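-- pv_equiv track=rewrite | github.com/MrChepe09/Competitive-Programming-Codes | A2OJ/Ladder 0-1300/string_task.py | stringtask
-- ===== SOURCE A (Python) =====
-- def stringtask(s):
--     res = []
--     vowels = ['A', 'a', 'e', 'E', 'i', 'I', 'o', 'O', 'u', 'U', 'y', 'Y']
--     for i in s:
--         if(i not in vowels):
--             res.append('.')
--             res.append(i.lower())
--     ans = ''.join(res)
--     return ans
-- ===== SOURCE B (Python) =====
-- def stringtask(s):
--     t = s.lower()
--     for v in "aeiouy":
--         t = t.replace(v, "")
--     return "." + ".".join(t) if t else ""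
-- ===== Notes on version B (the rewrite author's own statement) =====
-- stated objective: faster
-- what changed: Instead of A's single per-character loop that tests a vowel list and appends dot plus lowered char to an accumulator, B works on whole strings: lowercase the entire string once, delete each of the six lowercase vowels with a str.replace pass, then join the surviving characters with dot separators behind a leading dot.
import Mathlib
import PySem

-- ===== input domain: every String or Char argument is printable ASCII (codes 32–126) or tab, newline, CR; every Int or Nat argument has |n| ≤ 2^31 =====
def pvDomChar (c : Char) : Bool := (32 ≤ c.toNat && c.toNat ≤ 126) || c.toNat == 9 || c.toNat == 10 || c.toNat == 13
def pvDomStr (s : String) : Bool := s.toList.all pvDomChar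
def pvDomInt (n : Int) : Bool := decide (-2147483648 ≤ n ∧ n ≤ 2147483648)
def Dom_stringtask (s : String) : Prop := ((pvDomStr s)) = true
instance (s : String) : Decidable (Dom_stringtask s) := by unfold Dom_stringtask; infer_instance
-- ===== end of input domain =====

-- B replaces A's per-character accumulator loop with whole-string passes: lower the string once, delete each lowercase vowel with a replace pass, then join the survivors with '.' separators behind a leading '.'.


-- ===== PORT A =====
-- the vowel list, in A's order
def stVowels : List Char := ['A', 'a', 'e', 'E', 'i', 'I', 'o', 'O', 'u', 'U', 'y', 'Y']

-- A: one loop over s, appending '.' and i.lower() to res when i is not a vowel; ''.join at the end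
def stringtask (s : String) : String :=
  String.mk (s.toList.foldl
    (fun res i => if stVowels.contains i then res else res ++ ['.', PySem.Chars.lowerChar i]) [])

-- ===== PORT B =====
-- B: t = s.lower(); then one replace(v, "") pass per lowercase vowel; then "." + ".".join(t) if t else ""
def stringtask_alt (s : String) : String :=
  let t := ['a','e','i','o','u','y'].foldl
    (fun t v => PySem.Chars.replace t [v] []) (PySem.Chars.lower s.toList)
  if t = [] then "" else String.mk ('.' :: PySem.Chars.join ['.'] (t.map (fun c => [c])))

-- ===== PRECONDITION & SPEC =====
def Spec_stringtask (s : String) (out : String) : Prop := out = stringtask_alt s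
instance (s : String) (out : String) : Decidable (Spec_stringtask s out) := by unfold Spec_stringtask; infer_instance

-- ===== CLAIM (what is proved, stated in full; the proofs are below) =====
def Claim_equal_stringtask : Prop := ∀ (s : String), Dom_stringtask s → Spec_stringtask s (stringtask s)

-- ===== LEMMAS AND PROOFS =====
theorem char_eq_iff (x y : Char) : x = y ↔ x.toNat = y.toNat :=
  ⟨fun h => h ▸ rfl, fun h => Char.ext (by simpa [Char.toNat] using UInt32.toNat_inj.mp h)⟩

theorem char_le_iff (x y : Char) : x ≤ y ↔ x.toNat ≤ y.toNat := by
  rw [Char.le_def, UInt32.le_iff_toNat_le]; rfl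

-- lowering a character lands in the lowercase vowels iff the character was one of A's 12 vowels
theorem st_lower_mem (c : Char) :
    (PySem.Chars.lowerChar c ∈ (['a','e','i','o','u','y'] : List Char)) ↔ c ∈ stVowels := by
  simp only [stVowels, PySem.Chars.lowerChar, PySem.Chars.isupper, List.mem_cons,
    List.not_mem_nil, or_false, Bool.and_eq_true, decide_eq_true_eq, char_le_iff, char_eq_iff,
    show ('A':Char).toNat = 65 from rfl, show ('Z':Char).toNat = 90 from rfl,
    show ('a':Char).toNat = 97 from rfl, show ('e':Char).toNat = 101 from rfl,
    show ('i':Char).toNat = 105 from rfl, show ('o':Char).toNat = 111 from rfl,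
    show ('u':Char).toNat = 117 from rfl, show ('y':Char).toNat = 121 from rfl,
    show ('E':Char).toNat = 69 from rfl, show ('I':Char).toNat = 73 from rfl,
    show ('O':Char).toNat = 79 from rfl, show ('U':Char).toNat = 85 from rfl,
    show ('Y':Char).toNat = 89 from rfl]
  split_ifs with h
  · rw [Char.toNat_ofNat, if_pos (Or.inl (by omega))]
    omega
  · omega

-- A's interleaved foldl equals acc ++ (filter then flatMap)
theorem st_foldl_eq (cs : List Char) (acc : List Char) :
    cs.foldl (fun res i => if stVowels.contains i then res else res ++ ['.', PySem.Chars.lowerChar i]) acc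
      = acc ++ (cs.filter (fun c => !(stVowels.contains c))).flatMap
          (fun c => ['.', PySem.Chars.lowerChar c]) := by
  induction cs generalizing acc with
  | nil => simp
  | cons c cs ih =>
    simp only [List.foldl_cons]
    by_cases h : stVowels.contains c = true
    · rw [if_pos h, ih, List.filter_cons_of_neg (by simp [List.mem_of_elem_eq_true h])]
    · rw [if_neg h, ih, List.filter_cons_of_pos (by simp only [Bool.not_eq_true] at h; simp [List.contains_eq_mem] at h ⊢; exact h)]
      simp

-- a replace pass with a single-char pattern and empty replacement is a filter
theorem st_replace_go (v : Char) (l : List Char) (fuel : Nat) (acc : List Char)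
    (h : l.length ≤ fuel) :
    PySem.Chars.replace.go [v] [] fuel l acc
      = acc.reverse ++ l.filter (fun c => !(c == v)) := by
  induction l generalizing fuel acc with
  | nil => cases fuel <;> simp [PySem.Chars.replace.go]
  | cons c t ih =>
    cases fuel with
    | zero => simp at h
    | succ fuel =>
      simp only [PySem.Chars.replace.go, List.filter_cons]
      by_cases hv : c = v
      · subst hv
        rw [if_pos (by simp [List.isPrefixOf])]
        simp only [List.length_cons] at h
        simpa using ih fuel acc (by omega)
      · rw [if_neg (by simp [List.isPrefixOf, Ne.symm hv])]
        simp only [List.length_cons] at h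
        rw [ih fuel (c :: acc) (by omega)]
        simp [hv]

theorem st_replace_single (v : Char) (l : List Char) :
    PySem.Chars.replace l [v] [] = l.filter (fun c => !(c == v)) := by
  simp only [PySem.Chars.replace, List.isEmpty_cons, Bool.false_eq_true, if_false]
  simpa using st_replace_go v l l.length [] le_rfl

-- the chain of per-vowel filters is one filter against the whole vowel list
theorem st_foldl_filter (vs : List Char) (l : List Char) :
    vs.foldl (fun t v => t.filter (fun c => !(c == v))) l
      = l.filter (fun c => !(vs.contains c)) := by
  induction vs generalizing l with
  | nil => simp
  | cons v vs ih =>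
    simp only [List.foldl_cons, ih, List.filter_filter]
    apply List.filter_congr
    intro c _
    by_cases h : c = v <;> simp [h]

-- '.'-separated join of singletons, behind a leading '.', is a dot before every character
theorem st_join_eq (c : Char) (t : List Char) :
    PySem.Chars.join ['.'] ((c :: t).map (fun d => [d])) = c :: t.flatMap (fun d => ['.', d]) := by
  induction t generalizing c with
  | nil => simp [PySem.Chars.join, List.intercalate]
  | cons d u ih =>
    simp only [List.map_cons] at ih ⊢
    simp [PySem.Chars.join, List.intercalate, List.intersperse] at ih ⊢
    simp [ih]

-- ===== VERDICT (by name: the statement is the Claim_ definition above) =====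
theorem stringtask_spec : Claim_equal_stringtask := by
  intro s _
  unfold Spec_stringtask stringtask stringtask_alt
  rw [st_foldl_eq]
  simp only [st_replace_single, st_foldl_filter, List.nil_append]
  have hpred : (PySem.Chars.lower s.toList).filter
        (fun c => !(['a','e','i','o','u','y'] : List Char).contains c)
      = (s.toList.filter (fun c => !stVowels.contains c)).map PySem.Chars.lowerChar := by
    rw [PySem.Chars.lower, List.filter_map]
    congr 1
    apply List.filter_congr
    intro c _
    simp only [Function.comp_apply, List.contains_eq_mem]
    rw [show (decide (c ∈ stVowels)) = decide (PySem.Chars.lowerChar c ∈ (['a','e','i','o','u','y'] : List Char)) from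
      decide_eq_decide.mpr (st_lower_mem c).symm]
  rw [hpred]
  cases hk : s.toList.filter (fun c => !stVowels.contains c) with
  | nil => rfl
  | cons c t =>
    rw [List.map_cons, if_neg (by simp), st_join_eq]
    simp [List.flatMap_cons, List.flatMap_map]
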